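-- pv_equiv track=rewrite | github.com/sardentrasi/gp-injector | gp_injector.py | _apply_remap
-- ===== SOURCE A (Python) =====
-- BUTTON_NAMES = [
--     'X', 'A', 'B', 'Y', 'LB', 'RB', 'LT_DIGITAL', 'RT_DIGITAL',
--     'HOME', 'START', 'BACK', 'L3', 'R3'
-- ]
--
-- def _apply_remap(buttons, remap):
--     if not remap:
--         return buttons
--     original = dict(buttons)
--     result = {b: 0 for b in BUTTON_NAMES}
--     for btn_name, value in original.items():
--         if not value:
--             continue
--         target = remap.get(btn_name, btn_name)
--         if target in result:
--             result[target] = 1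
--     return result
-- ===== SOURCE B (Python) =====
-- BUTTON_NAMES = [
--     'X', 'A', 'B', 'Y', 'LB', 'RB', 'LT_DIGITAL', 'RT_DIGITAL',
--     'HOME', 'START', 'BACK', 'L3', 'R3'
-- ]
--
-- def _apply_remap(buttons, remap):
--     if not remap:
--         return buttons
--     orig = dict(buttons)
--     def pressed(target):
--         # is any pressed button remapped onto this target?
--         return any(v and remap.get(k, k) == target for k, v in orig.items())
--     return {b: (1 if pressed(b) else 0) for b in BUTTON_NAMES}
-- ===== Notes on version B (the rewrite author's own statement) =====
-- stated objective: alternative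
-- what changed: A does one scatter pass over the pressed buttons writing 1s into a pre-zeroed dict; B inverts the loop structure: for each of the 13 fixed output names it scans the buttons with any() asking whether some pressed button remaps onto that name (per-target existential search instead of a single scatter pass).
import Mathlib
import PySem

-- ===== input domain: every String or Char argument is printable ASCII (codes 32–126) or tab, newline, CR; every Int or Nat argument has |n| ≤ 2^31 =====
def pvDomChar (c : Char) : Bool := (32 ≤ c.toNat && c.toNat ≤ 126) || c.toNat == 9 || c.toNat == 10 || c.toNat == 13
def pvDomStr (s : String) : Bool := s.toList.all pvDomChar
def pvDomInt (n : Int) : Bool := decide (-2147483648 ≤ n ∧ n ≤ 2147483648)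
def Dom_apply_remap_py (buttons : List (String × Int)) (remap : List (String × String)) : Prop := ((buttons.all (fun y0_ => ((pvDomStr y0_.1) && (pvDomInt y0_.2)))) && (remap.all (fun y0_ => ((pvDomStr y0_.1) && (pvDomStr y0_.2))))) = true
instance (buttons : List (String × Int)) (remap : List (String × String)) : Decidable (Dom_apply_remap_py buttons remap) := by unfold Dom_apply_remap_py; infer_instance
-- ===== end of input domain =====

-- B inverts the loop structure: instead of A's scatter pass over the pressed buttons, it asks,
-- for each fixed output name, whether some pressed button remaps onto it (per-target search).

def pvButtonNames : List String :=
  ["X", "A", "B", "Y", "LB", "RB", "LT_DIGITAL", "RT_DIGITAL",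
   "HOME", "START", "BACK", "L3", "R3"]

-- ===== PORT A =====
def apply_remap_py (buttons : List (String × Int)) (remap : List (String × String)) : List (String × Int) :=
  if remap.isEmpty then buttons
  else
    let original := PySem.Dict.ofList buttons
    let result0 : PySem.Dict String Int :=
      pvButtonNames.foldl (fun d b => d.insert b 0) PySem.Dict.empty
    let result :=
      original.items.foldl (fun d p =>
        if p.2 == 0 then d
        else
          let target := (PySem.Dict.mk remap).getD p.1 p.1
          if d.contains target then d.insert target 1 else d) result0
    result.items

-- ===== PORT B =====
def apply_remap_py_alt (buttons : List (String × Int)) (remap : List (String × String)) : List (String × Int) :=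
  if remap.isEmpty then buttons
  else
    let orig := PySem.Dict.ofList buttons
    -- pressed target = any(v and remap.get(k, k) == target for k, v in orig.items())
    let pressed := fun (target : String) =>
      orig.items.any (fun p => !(p.2 == 0) && ((PySem.Dict.mk remap).getD p.1 p.1 == target))
    pvButtonNames.map (fun b => (b, if pressed b then (1 : Int) else 0))

-- ===== PRECONDITION & SPEC =====
def Spec_apply_remap_py (buttons : List (String × Int)) (remap : List (String × String)) (out : List (String × Int)) : Prop := out = apply_remap_py_alt buttons remap
instance (buttons : List (String × Int)) (remap : List (String × String)) (out : List (String × Int)) : Decidable (Spec_apply_remap_py buttons remap out) := by unfold Spec_apply_remap_py; infer_instance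

-- ===== CLAIM (what is proved, stated in full; the proofs are below) =====
def Claim_equal_apply_remap_py : Prop := ∀ (buttons : List (String × Int)) (remap : List (String × String)), Dom_apply_remap_py buttons remap → Spec_apply_remap_py buttons remap (apply_remap_py buttons remap)

-- ===== LEMMAS AND PROOFS =====

-- the zero-initialised result dict, in closed form
lemma result0_eq :
    pvButtonNames.foldl (fun (d : PySem.Dict String Int) b => d.insert b 0) PySem.Dict.empty
      = PySem.Dict.mk (pvButtonNames.map (fun b => (b, (0 : Int)))) := by
  decide

-- inserting into a dict whose items are a map over names rewrites the value at that name
lemma insert_map_items (names : List String) (g : String → Int) (k : String) (v : Int)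
    (hk : (PySem.Dict.mk (names.map (fun b => (b, g b)))).contains k = true) :
    (PySem.Dict.mk (names.map (fun b => (b, g b)))).insert k v
      = PySem.Dict.mk (names.map (fun b => (b, if b = k then v else g b))) := by
  simp only [PySem.Dict.insert, hk, if_true, List.map_map]
  congr 1
  apply List.map_congr_left
  intro b _
  by_cases h : b = k <;> simp [h]

lemma contains_map_items (names : List String) (g : String → Int) (k : String) :
    (PySem.Dict.mk (names.map (fun b => (b, g b)))).contains k = names.contains k := by
  rw [Bool.eq_iff_iff]
  simp only [PySem.Dict.contains, List.any_map, List.any_eq_true, Function.comp_apply,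
    beq_iff_eq, List.contains_eq_mem, decide_eq_true_eq]
  constructor
  · rintro ⟨b, hb, rfl⟩; exact hb
  · intro h; exact ⟨k, h, rfl⟩

-- the loop invariant: A's scatter fold over ps rewrites, at each name b, the value to 1
-- exactly when some nonzero-valued p in ps remaps onto b
lemma loop_eq (remap : List (String × String)) (ps : List (String × Int)) (g : String → Int) :
    (ps.foldl (fun d p =>
        if p.2 == 0 then d
        else
          let target := (PySem.Dict.mk remap).getD p.1 p.1
          if d.contains target then d.insert target 1 else d)
      (PySem.Dict.mk (pvButtonNames.map (fun b => (b, g b))))).items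
    = pvButtonNames.map (fun b =>
        (b, if ps.any (fun p => !(p.2 == 0) && ((PySem.Dict.mk remap).getD p.1 p.1 == b))
            then 1 else g b)) := by
  induction ps generalizing g with
  | nil => simp
  | cons p ps ih =>
    rw [List.foldl_cons]
    by_cases hz : p.2 = 0
    · have h1 : (p.2 == 0) = true := by simp [hz]
      simp only [h1, List.any_cons, Bool.not_true, Bool.false_and, Bool.false_or, reduceIte]
      exact ih g
    · have h1 : (p.2 == 0) = false := by simp [hz]
      simp only [h1, List.any_cons, Bool.not_false, Bool.true_and, Bool.false_eq_true, if_false]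
      set t := (PySem.Dict.mk remap).getD p.1 p.1 with ht
      rw [contains_map_items pvButtonNames g t]
      by_cases hin : t ∈ pvButtonNames
      · have hc : pvButtonNames.contains t = true := by
          simp [List.contains_eq_mem, hin]
        rw [hc]
        simp only [reduceIte]
        rw [insert_map_items pvButtonNames g t 1
            (by rw [contains_map_items pvButtonNames g t]; exact hc),
          ih (fun b => if b = t then 1 else g b)]
        apply List.map_congr_left
        intro b _
        congr 1
        by_cases hbt : t = b
        · simp [hbt]
        · have : (t == b) = false := by simp [hbt]
          simp only [this, Bool.false_or]
          split_ifs with h1 h2 <;> first | rfl | (exfalso; exact hbt (h2.symm))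
      · have hc : pvButtonNames.contains t = false := by
          simp [List.contains_eq_mem, hin]
        rw [hc]
        simp only [Bool.false_eq_true, if_false]
        rw [ih g]
        apply List.map_congr_left
        intro b hb
        have hbt : (t == b) = false := by
          simp only [beq_eq_false_iff_ne, ne_eq]
          intro h; exact hin (h ▸ hb)
        rw [hbt, Bool.false_or]

-- ===== VERDICT (by name: the statement is the Claim_ definition above) =====
theorem apply_remap_py_spec : Claim_equal_apply_remap_py := by
  intro buttons remap _
  unfold Spec_apply_remap_py apply_remap_py apply_remap_py_alt
  by_cases h : remap.isEmpty
  · simp [h]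
  · simp only [h, Bool.false_eq_true, if_false]
    rw [result0_eq, loop_eq]
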